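-- pv_equiv track=rewrite | github.com/yaeba/binary-search-solutions | solutions/Valid-N-Queens.py | solve
-- ===== SOURCE A (Python) =====
-- def solve(matrix):
--     # key point here is to realise we can identify the diagonal and antidiagonal
--     # by using x + y and x - y (think gradient = +1 or -1)
--     rows, cols, f_diags, b_diags = set(), set(), set(), set()
--     for r in range(len(matrix)):
--         for c in range(len(matrix[r])):
--             if not matrix[r][c]:
--                 continue
--             if r in rows or c in cols or r + c in f_diags or r - c in b_diags:
--                 return False
--             rows.add(r)
--             cols.add(c)
--             f_diags.add(r + c)
--             b_diags.add(r - c)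
--     return len(rows) == len(matrix)
-- ===== SOURCE B (Python) =====
-- def solve(matrix):
--     queens = [(r, c) for r, row in enumerate(matrix) for c, v in enumerate(row) if v]
--     if len(queens) != len(matrix):
--         return False
--     for i in range(len(queens)):
--         r1, c1 = queens[i]
--         for j in range(i + 1, len(queens)):
--             r2, c2 = queens[j]
--             if r1 == r2 or c1 == c2 or abs(r1 - r2) == abs(c1 - c2):
--                 return False
--     return True
-- ===== Notes on version B (the rewrite author's own statement) =====
-- stated objective: alternative
-- what changed: Replaced the single-pass hash-set membership algorithm (four maintained sets keyed by r, c, r+c, r-c with early return) by a set-free pairwise geometric check: collect all queen positions, check the count first, then test every pair of queens directly with r1==r2 or c1==c2 or abs(r1-r2)==abs(c1-c2).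
import Mathlib
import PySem

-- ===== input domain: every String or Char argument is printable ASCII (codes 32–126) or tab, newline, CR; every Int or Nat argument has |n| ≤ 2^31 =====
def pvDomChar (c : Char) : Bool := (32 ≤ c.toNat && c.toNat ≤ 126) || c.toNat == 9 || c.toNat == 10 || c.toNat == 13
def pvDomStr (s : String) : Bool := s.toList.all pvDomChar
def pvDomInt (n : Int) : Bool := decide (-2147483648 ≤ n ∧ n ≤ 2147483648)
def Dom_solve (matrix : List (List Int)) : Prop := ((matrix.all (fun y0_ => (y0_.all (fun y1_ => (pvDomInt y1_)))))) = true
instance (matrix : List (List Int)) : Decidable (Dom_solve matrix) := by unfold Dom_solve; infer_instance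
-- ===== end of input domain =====

-- B replaces A's four incremental hash sets with a set-free pairwise geometric check:
-- collect the queen positions, check the count, then test every pair directly
-- (alternative decomposition, same observable behaviour).

-- ===== PORT A =====
-- state: (rows, cols, f_diags, b_diags)
abbrev QState := PySem.Set Int × PySem.Set Int × PySem.Set Int × PySem.Set Int

-- inner 'for c in range(len(matrix[r]))' loop; none = the 'return False' was taken
def solveInner (r : Int) (c : Int) (row : List Int) (st : QState) : Option QState :=
  match row with
  | [] => some st
  | v :: rest =>
    if v = 0 then solveInner r (c + 1) rest st   -- 'if not matrix[r][c]: continue'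
    else if PySem.Set.contains st.1 r || PySem.Set.contains st.2.1 c ||
            PySem.Set.contains st.2.2.1 (r + c) || PySem.Set.contains st.2.2.2 (r - c) then
      none
    else
      solveInner r (c + 1) rest
        (PySem.Set.add st.1 r, PySem.Set.add st.2.1 c,
         PySem.Set.add st.2.2.1 (r + c), PySem.Set.add st.2.2.2 (r - c))

-- outer 'for r in range(len(matrix))' loop
def solveOuter (r : Int) (rows : List (List Int)) (st : QState) : Option QState :=
  match rows with
  | [] => some st
  | row :: rest =>
    match solveInner r 0 row st with
    | none => none
    | some st' => solveOuter (r + 1) rest st'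

def solve (matrix : List (List Int)) : Bool :=
  match solveOuter 0 matrix (PySem.Set.empty, PySem.Set.empty, PySem.Set.empty, PySem.Set.empty) with
  | none => false
  | some st => decide (st.1.length = matrix.length)   -- len(rows) == len(matrix)

-- ===== PORT B =====
-- inner 'for j in range(i+1, len(queens))' loop: does queen q attack any later queen?
def noAttackFrom (q : Int × Int) : List (Int × Int) → Bool
  | [] => true
  | q' :: rest =>
    if q.1 = q'.1 || q.2 = q'.2 || (q.1 - q'.1).natAbs = (q.2 - q'.2).natAbs then false
    else noAttackFrom q rest

-- outer 'for i in range(len(queens))' loop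
def pairsOk : List (Int × Int) → Bool
  | [] => true
  | q :: rest => noAttackFrom q rest && pairsOk rest

def solve_alt (matrix : List (List Int)) : Bool :=
  let queens : List (Int × Int) :=
    (PySem.List.enumerate matrix).flatMap (fun p =>
      (PySem.List.enumerate p.2).filterMap (fun q =>
        if q.2 ≠ 0 then some (p.1, q.1) else none))
  if queens.length ≠ matrix.length then false
  else pairsOk queens

-- ===== PRECONDITION & SPEC =====
def Spec_solve (matrix : List (List Int)) (out : Bool) : Prop := out = solve_alt matrix
instance (matrix : List (List Int)) (out : Bool) : Decidable (Spec_solve matrix out) := by unfold Spec_solve; infer_instance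

-- ===== CLAIM (what is proved, stated in full; the proofs are below) =====
def Claim_equal_solve : Prop := ∀ (matrix : List (List Int)), Dom_solve matrix → Spec_solve matrix (solve matrix)

-- ===== LEMMAS AND PROOFS =====

-- queen positions of one row, starting at column index c
def posRow (r c : Int) (row : List Int) : List (Int × Int) :=
  match row with
  | [] => []
  | v :: rest => if v = 0 then posRow r (c + 1) rest else (r, c) :: posRow r (c + 1) rest

-- queen positions of the whole matrix, starting at row index r
def posAll (r : Int) (rows : List (List Int)) : List (Int × Int) :=
  match rows with
  | [] => []
  | row :: rest => posRow r 0 row ++ posAll (r + 1) rest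

-- A's loop rephrased over the explicit position list
def goA (ps : List (Int × Int)) (st : QState) : Option QState :=
  match ps with
  | [] => some st
  | (r, c) :: rest =>
    if PySem.Set.contains st.1 r || PySem.Set.contains st.2.1 c ||
       PySem.Set.contains st.2.2.1 (r + c) || PySem.Set.contains st.2.2.2 (r - c) then
      none
    else
      goA rest
        (PySem.Set.add st.1 r, PySem.Set.add st.2.1 c,
         PySem.Set.add st.2.2.1 (r + c), PySem.Set.add st.2.2.2 (r - c))

def stOf (pre : List (Int × Int)) : QState :=
  (PySem.Set.ofList (pre.map (fun p => p.1)),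
   PySem.Set.ofList (pre.map (fun p => p.2)),
   PySem.Set.ofList (pre.map (fun p => p.1 + p.2)),
   PySem.Set.ofList (pre.map (fun p => p.1 - p.2)))

-- "all four projections of ps are duplicate-free"
def nodup4 (ps : List (Int × Int)) : Bool :=
  decide (ps.map (fun p => p.1)).Nodup && decide (ps.map (fun p => p.2)).Nodup &&
  decide (ps.map (fun p => p.1 + p.2)).Nodup && decide (ps.map (fun p => p.1 - p.2)).Nodup

theorem inner_eq_go (row : List Int) : ∀ (r c : Int) (st : QState),
    solveInner r c row st = goA (posRow r c row) st := by
  induction row with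
  | nil => intro r c st; rfl
  | cons v rest ih =>
    intro r c st
    by_cases hv : v = 0
    · simp [solveInner, posRow, hv, ih]
    · simp only [solveInner, posRow, if_neg hv, goA]
      split_ifs with h
      · rfl
      · exact ih r (c + 1) _

theorem goA_append (xs ys : List (Int × Int)) : ∀ (st : QState),
    goA (xs ++ ys) st = (goA xs st).bind (fun st' => goA ys st') := by
  induction xs with
  | nil => intro st; rfl
  | cons p rest ih =>
    intro st
    obtain ⟨r, c⟩ := p
    simp only [List.cons_append, goA]
    split_ifs with h
    · rfl
    · exact ih _

theorem outer_eq_go (rows : List (List Int)) : ∀ (r : Int) (st : QState),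
    solveOuter r rows st = goA (posAll r rows) st := by
  induction rows with
  | nil => intro r st; rfl
  | cons row rest ih =>
    intro r st
    simp only [solveOuter, posAll, goA_append, inner_eq_go]
    cases goA (posRow r 0 row) st with
    | none => rfl
    | some st' => simp [ih]

theorem not_nodup_of_mem_left {α : Type} (a : α) (l1 l2 : List α) (h : a ∈ l1) :
    ¬ (l1 ++ a :: l2).Nodup := by
  intro hn
  rw [List.nodup_append] at hn
  exact hn.2.2 a h a (List.mem_cons_self) rfl

theorem nodup_append_singleton {α : Type} (l : List α) (a : α)
    (h1 : l.Nodup) (h2 : a ∉ l) : (l ++ [a]).Nodup := by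
  rw [List.nodup_append]
  exact ⟨h1, List.nodup_singleton a, by
    intro x hx y hy
    simp only [List.mem_singleton] at hy
    subst hy
    exact fun he => h2 (he ▸ hx)⟩

theorem go_spec (ps : List (Int × Int)) : ∀ (pre : List (Int × Int)), nodup4 pre = true →
    goA ps (stOf pre) = if nodup4 (pre ++ ps) then some (stOf (pre ++ ps)) else none := by
  induction ps with
  | nil =>
    intro pre h
    simp [goA, h]
  | cons p rest ih =>
    intro pre h
    obtain ⟨r, c⟩ := p
    simp only [goA, stOf]
    by_cases hit : r ∈ pre.map (fun p => p.1) ∨ c ∈ pre.map (fun p => p.2) ∨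
        (r + c) ∈ pre.map (fun p => p.1 + p.2) ∨ (r - c) ∈ pre.map (fun p => p.1 - p.2)
    · rw [if_pos, if_neg]
      · intro hn
        simp only [nodup4, Bool.and_eq_true, decide_eq_true_eq, List.map_append,
          List.map_cons] at hn
        rcases hit with h1 | h1 | h1 | h1
        · exact not_nodup_of_mem_left _ _ _ h1 hn.1.1.1
        · exact not_nodup_of_mem_left _ _ _ h1 hn.1.1.2
        · exact not_nodup_of_mem_left _ _ _ h1 hn.1.2
        · exact not_nodup_of_mem_left _ _ _ h1 hn.2
      · simp only [Bool.or_eq_true, PySem.Set.contains_iff, PySem.Set.mem_ofList]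
        tauto
    · rw [not_or, not_or, not_or] at hit
      obtain ⟨h1, h2, h3, h4⟩ := hit
      rw [if_neg]
      · have e1 : (PySem.Set.ofList (pre.map (fun p => p.1))).add r
            = PySem.Set.ofList ((pre ++ [(r, c)]).map (fun p => p.1)) := by
          simp [List.map_append, PySem.Set.ofList_append_singleton]
        have e2 : (PySem.Set.ofList (pre.map (fun p => p.2))).add c
            = PySem.Set.ofList ((pre ++ [(r, c)]).map (fun p => p.2)) := by
          simp [List.map_append, PySem.Set.ofList_append_singleton]
        have e3 : (PySem.Set.ofList (pre.map (fun p => p.1 + p.2))).add (r + c)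
            = PySem.Set.ofList ((pre ++ [(r, c)]).map (fun p => p.1 + p.2)) := by
          simp [List.map_append, PySem.Set.ofList_append_singleton]
        have e4 : (PySem.Set.ofList (pre.map (fun p => p.1 - p.2))).add (r - c)
            = PySem.Set.ofList ((pre ++ [(r, c)]).map (fun p => p.1 - p.2)) := by
          simp [List.map_append, PySem.Set.ofList_append_singleton]
        have hpre' : nodup4 (pre ++ [(r, c)]) = true := by
          simp only [nodup4, Bool.and_eq_true, decide_eq_true_eq] at h ⊢
          simp only [List.map_append, List.map_cons, List.map_nil]
          exact ⟨⟨⟨nodup_append_singleton _ _ h.1.1.1 h1, nodup_append_singleton _ _ h.1.1.2 h2⟩,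
            nodup_append_singleton _ _ h.1.2 h3⟩, nodup_append_singleton _ _ h.2 h4⟩
        rw [e1, e2, e3, e4]
        have := ih (pre ++ [(r, c)]) hpre'
        rw [show ((PySem.Set.ofList ((pre ++ [(r, c)]).map (fun p => p.1)),
              PySem.Set.ofList ((pre ++ [(r, c)]).map (fun p => p.2)),
              PySem.Set.ofList ((pre ++ [(r, c)]).map (fun p => p.1 + p.2)),
              PySem.Set.ofList ((pre ++ [(r, c)]).map (fun p => p.1 - p.2))) : QState)
            = stOf (pre ++ [(r, c)]) from rfl, this, List.append_assoc]
        rfl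
      · simp only [Bool.or_eq_true, PySem.Set.contains_iff, PySem.Set.mem_ofList]
        tauto

-- B's position list is exactly posAll
theorem posRow_eq (row : List Int) : ∀ (r c : Int),
    (PySem.List.enumerate row c).filterMap (fun q =>
      if q.2 ≠ 0 then some (r, q.1) else none) = posRow r c row := by
  induction row with
  | nil => intro r c; rfl
  | cons v rest ih =>
    intro r c
    rw [PySem.List.enumerate_cons, List.filterMap_cons]
    by_cases hv : v = 0
    · simp only [hv]
      rw [posRow, if_pos rfl, if_neg (by simp)]
      exact ih r (c + 1)
    · rw [posRow, if_neg hv]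
      rw [show (if (c, v).2 ≠ 0 then some (r, (c, v).1) else none) = some (r, c) by
        simp [hv]]
      rw [ih r (c + 1)]

theorem posAll_eq (rows : List (List Int)) : ∀ (r : Int),
    (PySem.List.enumerate rows r).flatMap (fun p =>
      (PySem.List.enumerate p.2).filterMap (fun q =>
        if q.2 ≠ 0 then some (p.1, q.1) else none)) = posAll r rows := by
  induction rows with
  | nil => intro r; rfl
  | cons row rest ih =>
    intro r
    rw [PySem.List.enumerate_cons, List.flatMap_cons, ih (r + 1)]
    show (PySem.List.enumerate row).filterMap _ ++ _ = _
    rw [posRow_eq row r 0]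
    rfl

-- the pairwise relation B checks, and its equivalence with the four projections
theorem noAttackFrom_iff (q : Int × Int) (l : List (Int × Int)) :
    noAttackFrom q l = true ↔ ∀ q' ∈ l,
      q.1 ≠ q'.1 ∧ q.2 ≠ q'.2 ∧ (q.1 - q'.1).natAbs ≠ (q.2 - q'.2).natAbs := by
  induction l with
  | nil => simp [noAttackFrom]
  | cons q' rest ih =>
    simp only [noAttackFrom]
    split_ifs with h
    · simp only [false_iff]
      intro hall
      have := hall q' (List.mem_cons_self)
      simp only [Bool.or_eq_true, decide_eq_true_eq] at h
      tauto
    · simp only [Bool.or_eq_true, decide_eq_true_eq, not_or] at h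
      rw [ih]
      constructor
      · intro hall q'' hq''
        rcases List.mem_cons.1 hq'' with rfl | hm
        · tauto
        · exact hall q'' hm
      · intro hall q'' hq''
        exact hall q'' (List.mem_cons_of_mem _ hq'')

theorem pairsOk_iff_pairwise (l : List (Int × Int)) :
    pairsOk l = true ↔ l.Pairwise (fun p q =>
      p.1 ≠ q.1 ∧ p.2 ≠ q.2 ∧ (p.1 - q.1).natAbs ≠ (p.2 - q.2).natAbs) := by
  induction l with
  | nil => simp [pairsOk]
  | cons q rest ih =>
    simp only [pairsOk, Bool.and_eq_true, List.pairwise_cons, ih, noAttackFrom_iff]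

theorem nodup4_iff_pairwise (l : List (Int × Int)) :
    nodup4 l = true ↔ l.Pairwise (fun p q =>
      p.1 ≠ q.1 ∧ p.2 ≠ q.2 ∧ (p.1 - q.1).natAbs ≠ (p.2 - q.2).natAbs) := by
  simp only [nodup4, Bool.and_eq_true, decide_eq_true_eq, List.Nodup,
    List.pairwise_map]
  rw [← List.pairwise_and_iff, ← List.pairwise_and_iff, ← List.pairwise_and_iff]
  constructor <;> intro h
  · exact h.imp (fun hx => by omega)
  · exact h.imp (fun hx => by omega)

theorem pairsOk_eq_nodup4 (l : List (Int × Int)) : pairsOk l = nodup4 l := by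
  by_cases h : nodup4 l = true
  · rw [h, (pairsOk_iff_pairwise l).2 ((nodup4_iff_pairwise l).1 h)]
  · rw [Bool.not_eq_true] at h
    rw [h, Bool.eq_false_iff]
    intro hp
    rw [Bool.eq_false_iff] at h
    exact h ((nodup4_iff_pairwise l).2 ((pairsOk_iff_pairwise l).1 hp))

theorem solve_eq (matrix : List (List Int)) : solve matrix = solve_alt matrix := by
  unfold solve solve_alt
  rw [outer_eq_go,
    show ((PySem.Set.empty, PySem.Set.empty, PySem.Set.empty, PySem.Set.empty) : QState)
      = stOf [] from rfl,
    go_spec _ [] rfl, posAll_eq]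
  simp only [List.nil_append, pairsOk_eq_nodup4]
  by_cases hnd : nodup4 (posAll 0 matrix) = true
  · rw [if_pos hnd]
    have n1 : (List.map (fun p => p.1) (posAll 0 matrix)).Nodup := by
      simp only [nodup4, Bool.and_eq_true, decide_eq_true_eq] at hnd
      exact hnd.1.1.1
    show decide ((stOf (posAll 0 matrix)).1.length = matrix.length) = _
    simp only [stOf, PySem.Set.ofList_eq_self_of_nodup _ n1, List.length_map]
    rw [hnd]
    by_cases hl : (posAll 0 matrix).length = matrix.length
    · simp [hl]
    · simp [hl]
  · rw [if_neg hnd, Bool.not_eq_true] at *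
    rw [hnd]
    simp

-- ===== VERDICT (by name: the statement is the Claim_ definition above) =====
theorem solve_spec : Claim_equal_solve := by
  intro matrix _
  exact solve_eq matrix
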